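-- pv_equiv track=rewrite | github.com/kriss-spy/pycalc | main.py | str_is_integer
-- ===== SOURCE A (Python) =====
-- def str_is_pos_integer(s):
--     if len(s) == 0:
--         return False
--     if len(s) > 1 and s[0] == "0":
--         return False
--     for c in s:
--         if not ("0" <= c <= "9"):
--             return False
--
--     return True
--
-- def str_is_integer(s):
--     if len(s) == 0:
--         return False
--     if s[0] == "-":
--         return str_is_pos_integer(s[1:])
--     if len(s) > 1 and s[0] == "0":
--         return False
--     for c in s:
--         if not ("0" <= c <= "9"):
--             return False
--
--     return True
-- ===== SOURCE B (Python) =====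
-- def str_is_integer(s):
--     # Deterministic finite automaton for the language -?(0|[1-9][0-9]*).
--     # States: 0 start, 1 after '-', 2 accepted lone zero, 3 accepted nonzero number, 4 reject sink.
--     def step(q, c):
--         if q == 0:
--             if c == "-":
--                 return 1
--             if c == "0":
--                 return 2
--             if "1" <= c <= "9":
--                 return 3
--             return 4
--         if q == 1:
--             if c == "0":
--                 return 2
--             if "1" <= c <= "9":
--                 return 3
--             return 4
--         if q == 3 and "0" <= c <= "9":
--             return 3
--         return 4
--     q = 0
--     for c in s:
--         q = step(q, c)
--     return q == 2 or q == 3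
-- ===== Notes on version B (the rewrite author's own statement) =====
-- stated objective: alternative
-- what changed: Replaces A's slice-off-the-sign / helper-function / leading-zero-branch-then-digit-loop structure with a single left-to-right pass of an explicit 5-state DFA recognising -?(0|[1-9][0-9]*).
import Mathlib
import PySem

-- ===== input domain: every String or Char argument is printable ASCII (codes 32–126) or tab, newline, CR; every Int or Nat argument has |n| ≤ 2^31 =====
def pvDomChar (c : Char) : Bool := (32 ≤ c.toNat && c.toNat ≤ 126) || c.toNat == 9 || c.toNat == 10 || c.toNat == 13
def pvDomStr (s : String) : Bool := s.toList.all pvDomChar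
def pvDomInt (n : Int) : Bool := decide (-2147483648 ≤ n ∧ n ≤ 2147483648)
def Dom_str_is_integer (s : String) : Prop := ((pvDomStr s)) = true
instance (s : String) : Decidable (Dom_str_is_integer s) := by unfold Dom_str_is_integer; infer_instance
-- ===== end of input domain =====

-- B replaces A's slice/helper/branch-then-loop structure with one left-to-right pass of an
-- explicit 5-state DFA recognising -?(0|[1-9][0-9]*) (objective: alternative; same asymptotic cost).


-- ===== PORT A =====
-- helper str_is_pos_integer, transliterated on the code-point list
def str_is_pos_integer_port (cs : List Char) : Bool :=
  if cs.length == 0 then false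
  else if decide (1 < cs.length) && (PySem.List.pyGet? cs 0 == some '0') then false
  else cs.all (fun c => decide ('0' ≤ c) && decide (c ≤ '9'))

-- body of str_is_integer on the code-point list (same statements, same order)
def str_is_integer_list (cs : List Char) : Bool :=
  if cs.length == 0 then false
  else if PySem.List.pyGet? cs 0 == some '-' then
    str_is_pos_integer_port (PySem.List.slice cs (some 1) none)
  else if decide (1 < cs.length) && (PySem.List.pyGet? cs 0 == some '0') then false
  else cs.all (fun c => decide ('0' ≤ c) && decide (c ≤ '9'))

def str_is_integer (s : String) : Bool := str_is_integer_list s.toList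

-- ===== PORT B =====
-- DFA transition function, transliterated from Source B (states as Python ints)
def dfaStep (q : Int) (c : Char) : Int :=
  if q == 0 then
    if c == '-' then 1
    else if c == '0' then 2
    else if decide ('1' ≤ c) && decide (c ≤ '9') then 3
    else 4
  else if q == 1 then
    if c == '0' then 2
    else if decide ('1' ≤ c) && decide (c ≤ '9') then 3
    else 4
  else if q == 3 && (decide ('0' ≤ c) && decide (c ≤ '9')) then 3
  else 4

def str_is_integer_alt (s : String) : Bool :=
  let q := s.toList.foldl dfaStep 0
  q == 2 || q == 3

-- ===== PRECONDITION & SPEC =====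
def Spec_str_is_integer (s : String) (out : Bool) : Prop := out = str_is_integer_alt s
instance (s : String) (out : Bool) : Decidable (Spec_str_is_integer s out) := by unfold Spec_str_is_integer; infer_instance

-- ===== CLAIM (what is proved, stated in full; the proofs are below) =====
def Claim_equal_str_is_integer : Prop := ∀ (s : String), Dom_str_is_integer s → Spec_str_is_integer s (str_is_integer s)

-- ===== LEMMAS AND PROOFS =====
lemma pyGet?_zero_cons {α : Type} (x : α) (xs : List α) :
    PySem.List.pyGet? (x :: xs) (0 : Int) = some x := by
  simp [PySem.List.pyGet?, PySem.List.pyIdx?]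

-- state 4 is a sink
lemma run4 (cs : List Char) : cs.foldl dfaStep 4 = 4 := by
  induction cs with
  | nil => rfl
  | cons c rest ih => simpa [dfaStep] using ih

-- from state 2 (lone zero) any further character rejects
lemma run2 (cs : List Char) : cs.foldl dfaStep 2 = if cs.isEmpty then 2 else 4 := by
  cases cs with
  | nil => rfl
  | cons c rest => simpa [dfaStep] using run4 rest

-- from state 3 the DFA accepts exactly all-digit suffixes
lemma run3 (cs : List Char) :
    cs.foldl dfaStep 3
      = if cs.all (fun c => decide ('0' ≤ c) && decide (c ≤ '9')) then 3 else 4 := by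
  induction cs with
  | nil => rfl
  | cons c rest ih =>
    by_cases h : ('0' ≤ c ∧ c ≤ '9')
    · simp [dfaStep, h.1, h.2, ih]
    · have : (decide ('0' ≤ c) && decide (c ≤ '9')) = false := by
        rcases (not_and_or.mp h) with h1 | h1 <;> simp [h1]
      simp [dfaStep, this, run4 rest]

-- a printable character other than '0' that is at least '0' is at least '1'
lemma one_le_char_of_ne_zero {c : Char} (hc : ¬ c = '0') (h0 : '0' ≤ c) : '1' ≤ c := by
  by_contra hlt
  apply hc
  have h0v : ('0':Char).val.toNat ≤ c.val.toNat := by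
    simpa [Char.le_def, UInt32.le_iff_toNat_le] using h0
  have h1v : c.val.toNat < ('1':Char).val.toNat := by
    simpa [Char.lt_def, UInt32.lt_iff_toNat_lt] using not_le.mp hlt
  have c48 : ('0':Char).val.toNat = 48 := by decide
  have c49 : ('1':Char).val.toNat = 49 := by decide
  have : c.val.toNat = ('0':Char).val.toNat := by omega
  exact Char.ext (UInt32.toNat_inj.mp this)

-- A's helper equals the DFA run started in state 1 (just after '-')
lemma pos_eq (cs : List Char) :
    str_is_pos_integer_port cs
      = ((cs.foldl dfaStep 1 == 2) || (cs.foldl dfaStep 1 == 3)) := by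
  cases cs with
  | nil => rfl
  | cons c rest =>
    rw [str_is_pos_integer_port, pyGet?_zero_cons]
    by_cases hc : c = '0'
    · subst hc
      cases rest with
      | nil => decide
      | cons d rs =>
        have h2 := run2 (d :: rs)
        simp [dfaStep, List.foldl_cons, h2]
    · by_cases hd : ('1' ≤ c ∧ c ≤ '9')
      · have hc0 : ('0' ≤ c) := le_trans (by decide) hd.1
        have hstep : dfaStep 1 c = 3 := by simp [dfaStep, hc, hd.1, hd.2]
        rw [if_neg (by simp), if_neg (by simp [hc]), List.foldl_cons, hstep, run3]
        simp only [List.all_cons, hc0, hd.2, decide_true, Bool.true_and]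
        split_ifs with h <;> simp [h]
      · -- head is not a digit at all (c ≠ '0' and not in '1'..'9')
        have hnd : ¬ ('0' ≤ c ∧ c ≤ '9') := by
          rintro ⟨h0, h9⟩
          exact hd ⟨one_le_char_of_ne_zero hc h0, h9⟩
        have hstep : dfaStep 1 c = 4 := by
          rcases (not_and_or.mp hd) with h1 | h1 <;> simp [dfaStep, hc, h1]
        have hall : ((c :: rest).all (fun c => decide ('0' ≤ c) && decide (c ≤ '9'))) = false := by
          rcases (not_and_or.mp hnd) with h1 | h1 <;> simp [h1]
        simp [hall, List.foldl_cons, hstep, run4 rest]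

lemma list_eq (cs : List Char) :
    str_is_integer_list cs
      = ((cs.foldl dfaStep 0 == 2) || (cs.foldl dfaStep 0 == 3)) := by
  cases cs with
  | nil => rfl
  | cons c rest =>
    by_cases hc : c = '-'
    · subst hc
      have h1 : PySem.List.slice ('-' :: rest) (some (1:Int)) none = rest := by
        rw [PySem.List.slice_from _ (by norm_num)]; rfl
      rw [str_is_integer_list, if_neg (by simp), if_pos (by simp), h1,
        pos_eq, List.foldl_cons]
      norm_num [dfaStep]
    · -- non-'-' head: A's main body is textually the helper's body; DFA: step 0 c = step 1 c
      have hbody : str_is_integer_list (c :: rest) = str_is_pos_integer_port (c :: rest) := by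
        simp [str_is_integer_list, str_is_pos_integer_port, hc]
      have hstep : dfaStep 0 c = dfaStep 1 c := by simp [dfaStep, hc]
      rw [hbody, pos_eq, List.foldl_cons, List.foldl_cons, hstep]

-- ===== VERDICT (by name: the statement is the Claim_ definition above) =====
theorem str_is_integer_spec : Claim_equal_str_is_integer := by
  intro s _
  unfold Spec_str_is_integer str_is_integer str_is_integer_alt
  exact list_eq s.toList
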